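-- pv_equiv track=rewrite | github.com/qilimanjaro-tech/qiboconnection | tests/end2end/utils/slack_report_utils.py | _determine_results_emoji
-- ===== SOURCE A (Python) =====
-- PYTEST_VALID_CHARACTERS = [".", "F", "s", "x"]
--
-- PYTEST_SKIP_CHARACTERS = ["s"]
--
-- PYTEST_FAILURE_CHARACTERS = ["F"]
--
-- def _determine_results_emoji(summary: str):
--     """Computes which emoji should we use to indicate tests results depending on the presence of failed and/or skipped
--     tests
--     Args:
--         summary: text containing summary of the results of the tests
--
--     Returns:
--         str: emoji code understandable by slack
--     """
--     first_report_line = summary.split(" ")[0]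
--
--     if False in [test_result in PYTEST_VALID_CHARACTERS for test_result in first_report_line]:
--         return ":warning:"
--     elif True in [test_result in PYTEST_FAILURE_CHARACTERS for test_result in first_report_line]:
--         return ":red_circle:"
--     elif True in [test_result in PYTEST_SKIP_CHARACTERS for test_result in first_report_line]:
--         return ":large_yellow_circle:"
--     else:
--         return ":large_green_circle:"
-- ===== SOURCE B (Python) =====
-- _EMOJI_BY_SEVERITY = [":large_green_circle:", ":large_yellow_circle:", ":red_circle:", ":warning:"]
--
-- def _severity(ch):
--     if ch == 'F':
--         return 2
--     if ch == 's':
--         return 1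
--     if ch in '.x':
--         return 0
--     return 3
--
-- def _determine_results_emoji(summary: str):
--     sev = 0
--     for ch in summary.split(" ")[0]:
--         sev = max(sev, _severity(ch))
--     return _EMOJI_BY_SEVERITY[sev]
-- ===== Notes on version B (the rewrite author's own statement) =====
-- stated objective: alternative
-- what changed: Replaces the three staged membership scans (each building a boolean list searched for False/True) by a single pass that folds a per-character severity rank (invalid=3, F=2, s=1, ./x=0) with max and indexes an emoji table by the resulting maximum.
import Mathlib
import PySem

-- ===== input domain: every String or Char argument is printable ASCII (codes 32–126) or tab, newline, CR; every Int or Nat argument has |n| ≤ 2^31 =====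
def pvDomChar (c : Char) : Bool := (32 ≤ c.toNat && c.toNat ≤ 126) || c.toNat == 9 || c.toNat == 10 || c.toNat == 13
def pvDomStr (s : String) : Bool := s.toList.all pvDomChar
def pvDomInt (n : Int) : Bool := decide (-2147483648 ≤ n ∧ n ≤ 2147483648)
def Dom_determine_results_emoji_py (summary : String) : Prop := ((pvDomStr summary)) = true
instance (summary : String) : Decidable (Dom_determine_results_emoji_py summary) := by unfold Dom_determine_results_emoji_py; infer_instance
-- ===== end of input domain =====

-- B replaces A's three staged membership scans by one max-severity fold over the first token plus a table lookup (objective: alternative).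

-- ===== PORT A =====
def pytestValidChars : List Char := ['.', 'F', 's', 'x']
def pytestSkipChars : List Char := ['s']
def pytestFailureChars : List Char := ['F']

def determine_results_emoji_py (summary : String) : String :=
  let first_report_line := ((PySem.Str.split? summary " ").getD []).headD ""
  if false ∈ first_report_line.toList.map (fun c => pytestValidChars.contains c) then ":warning:"
  else if true ∈ first_report_line.toList.map (fun c => pytestFailureChars.contains c) then ":red_circle:"
  else if true ∈ first_report_line.toList.map (fun c => pytestSkipChars.contains c) then ":large_yellow_circle:"
  else ":large_green_circle:"

-- ===== PORT B =====
def emojiBySeverity : List String :=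
  [":large_green_circle:", ":large_yellow_circle:", ":red_circle:", ":warning:"]

def severity (c : Char) : Nat :=
  if c = 'F' then 2
  else if c = 's' then 1
  else if c = '.' ∨ c = 'x' then 0
  else 3

def determine_results_emoji_py_alt (summary : String) : String :=
  let first := ((PySem.Str.split? summary " ").getD []).headD ""
  let sev := first.toList.foldl (fun a c => max a (severity c)) 0
  emojiBySeverity.getD sev ""   -- index 0 ≤ sev ≤ 3 is always in range, so Python's list indexing never raises

-- ===== PRECONDITION & SPEC =====
def Spec_determine_results_emoji_py (summary : String) (out : String) : Prop := out = determine_results_emoji_py_alt summary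
instance (summary : String) (out : String) : Decidable (Spec_determine_results_emoji_py summary out) := by unfold Spec_determine_results_emoji_py; infer_instance

-- ===== CLAIM (what is proved, stated in full; the proofs are below) =====
def Claim_equal_determine_results_emoji_py : Prop := ∀ (summary : String), Dom_determine_results_emoji_py summary → Spec_determine_results_emoji_py summary (determine_results_emoji_py summary)

-- ===== LEMMAS AND PROOFS =====
theorem le_fold_iff (l : List Char) (k a : Nat) :
    k ≤ l.foldl (fun a c => max a (severity c)) a ↔ k ≤ a ∨ ∃ c ∈ l, k ≤ severity c := by
  induction l generalizing a with
  | nil => simp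
  | cons x xs ih =>
    simp only [List.foldl_cons, ih, le_max_iff, List.mem_cons]
    constructor
    · rintro ((h | h) | ⟨c, hc, h⟩)
      · exact Or.inl h
      · exact Or.inr ⟨x, Or.inl rfl, h⟩
      · exact Or.inr ⟨c, Or.inr hc, h⟩
    · rintro (h | ⟨c, (rfl | hc), h⟩)
      · exact Or.inl (Or.inl h)
      · exact Or.inl (Or.inr h)
      · exact Or.inr ⟨c, hc, h⟩

theorem fold_le (l : List Char) (k a : Nat) (ha : a ≤ k) (hl : ∀ c ∈ l, severity c ≤ k) :
    l.foldl (fun a c => max a (severity c)) a ≤ k := by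
  induction l generalizing a with
  | nil => exact ha
  | cons x xs ih =>
    exact ih _ (max_le ha (hl x (List.mem_cons_self))) (fun c hc => hl c (List.mem_cons_of_mem _ hc))

theorem sev_ge3 (c : Char) : 3 ≤ severity c ↔ c ∉ pytestValidChars := by
  unfold severity pytestValidChars
  by_cases h1 : c = 'F' <;> by_cases h2 : c = 's' <;> by_cases h3 : c = '.' ∨ c = 'x' <;>
    simp_all

theorem classify_eq (l : List Char) :
    (if false ∈ l.map (fun c => pytestValidChars.contains c) then ":warning:"
     else if true ∈ l.map (fun c => pytestFailureChars.contains c) then ":red_circle:"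
     else if true ∈ l.map (fun c => pytestSkipChars.contains c) then ":large_yellow_circle:"
     else ":large_green_circle:")
    = emojiBySeverity.getD (l.foldl (fun a c => max a (severity c)) 0) "" := by
  set m := l.foldl (fun a c => max a (severity c)) 0 with hm
  by_cases hv : ∀ c ∈ l, c ∈ pytestValidChars
  · have hA : ¬ ∃ a ∈ l, a ∉ pytestValidChars := by
      rintro ⟨a, ha, han⟩; exact han (hv a ha)
    by_cases hF : 'F' ∈ l
    · have h2 : 2 ≤ m := (le_fold_iff l 2 0).mpr (Or.inr ⟨'F', hF, by simp [severity]⟩)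
      have hle : m ≤ 2 := fold_le l 2 0 (by omega) (fun c hc => by
        have h := hv c hc; simp only [pytestValidChars, List.mem_cons, List.not_mem_nil, or_false] at h
        rcases h with rfl | rfl | rfl | rfl <;> simp [severity])
      have hmm : m = 2 := le_antisymm hle h2
      have hBF : ∃ a ∈ l, a ∈ pytestFailureChars := ⟨'F', hF, by simp [pytestFailureChars]⟩
      simp [hmm, emojiBySeverity, hA, hBF]
    · have hnF : ¬ ∃ a ∈ l, a ∈ pytestFailureChars := by
        rintro ⟨a, ha, haf⟩; simp [pytestFailureChars] at haf; exact hF (haf ▸ ha)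
      by_cases hs : 's' ∈ l
      · have h1 : 1 ≤ m := (le_fold_iff l 1 0).mpr (Or.inr ⟨'s', hs, by simp [severity]⟩)
        have hle : m ≤ 1 := fold_le l 1 0 (by omega) (fun c hc => by
          have h := hv c hc; simp only [pytestValidChars, List.mem_cons, List.not_mem_nil, or_false] at h
          rcases h with rfl | rfl | rfl | rfl
          · simp [severity]
          · exact absurd hc hF
          · simp [severity]
          · simp [severity])
        have hmm : m = 1 := le_antisymm hle h1
        have hS : ∃ a ∈ l, a ∈ pytestSkipChars := ⟨'s', hs, by simp [pytestSkipChars]⟩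
        simp [hmm, emojiBySeverity, hA, hnF, hS]
      · have hnS : ¬ ∃ a ∈ l, a ∈ pytestSkipChars := by
          rintro ⟨a, ha, has⟩; simp [pytestSkipChars] at has; exact hs (has ▸ ha)
        have hle : m ≤ 0 := fold_le l 0 0 le_rfl (fun c hc => by
          have h := hv c hc; simp only [pytestValidChars, List.mem_cons, List.not_mem_nil, or_false] at h
          rcases h with rfl | rfl | rfl | rfl
          · simp [severity]
          · exact absurd hc hF
          · exact absurd hc hs
          · simp [severity])
        have hmm : m = 0 := Nat.le_zero.mp hle
        simp [hmm, emojiBySeverity, hA, hnF, hnS]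
  · obtain ⟨c, hc, hcv⟩ : ∃ c ∈ l, c ∉ pytestValidChars := by
      by_contra h
      exact hv (fun c hc => by_contra fun hn => h ⟨c, hc, hn⟩)
    have h3 : 3 ≤ m := (le_fold_iff l 3 0).mpr (Or.inr ⟨c, hc, (sev_ge3 c).mpr hcv⟩)
    have hle : m ≤ 3 := fold_le l 3 0 (by omega) (fun c _ => by
      unfold severity; split_ifs <;> omega)
    have hmm : m = 3 := le_antisymm hle h3
    have hW : ∃ a ∈ l, a ∉ pytestValidChars := ⟨c, hc, hcv⟩
    simp [hmm, emojiBySeverity, hW]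

-- ===== VERDICT (by name: the statement is the Claim_ definition above) =====
theorem determine_results_emoji_py_spec : Claim_equal_determine_results_emoji_py := by
  intro summary _
  unfold Spec_determine_results_emoji_py determine_results_emoji_py determine_results_emoji_py_alt
  exact classify_eq _
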